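-- pv_equiv track=rewrite | github.com/uncode1/nvcfund-web-v-1.0.0 | utils/code_style_checker.py | _split_long_line
-- ===== SOURCE A (Python) =====
-- from typing import Dict, List, Tuple, Optional, Any
--
-- def _split_long_line(line: str) -> List[str]:
--     """Split a long line into multiple lines."""
--     if len(line) <= 100:
--         return [line]
--
--     # Find a good split point
--     split_point = 80
--     while split_point < len(line) and line[split_point] not in ' ,;':
--         split_point += 1
--
--     if split_point == len(line):
--         return [line]
--
--     return [line[:split_point].rstrip(), line[split_point:].lstrip()]
-- ===== SOURCE B (Python) =====
-- from typing import List
--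
-- def _split_long_line(line: str) -> List[str]:
--     """Split a long line into multiple lines."""
--     if len(line) <= 100:
--         return [line]
--
--     # First split character at or after 80: min of str.find over ' ', ',', ';'
--     found = [p for p in (line.find(c, 80) for c in ' ,;') if p != -1]
--     if not found:
--         return [line]
--
--     p = min(found)
--     return [line[:p].rstrip(), line[p:].lstrip()]
-- ===== Notes on version B (the rewrite author's own statement) =====
-- stated objective: faster
-- what changed: B replaces A's manual character-by-character index scan from position 80 with three str.find(c, 80) calls (one per split character ' , ;') combined by min, keeping the length guard and the rstrip/lstrip slicing.
import Mathlib
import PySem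

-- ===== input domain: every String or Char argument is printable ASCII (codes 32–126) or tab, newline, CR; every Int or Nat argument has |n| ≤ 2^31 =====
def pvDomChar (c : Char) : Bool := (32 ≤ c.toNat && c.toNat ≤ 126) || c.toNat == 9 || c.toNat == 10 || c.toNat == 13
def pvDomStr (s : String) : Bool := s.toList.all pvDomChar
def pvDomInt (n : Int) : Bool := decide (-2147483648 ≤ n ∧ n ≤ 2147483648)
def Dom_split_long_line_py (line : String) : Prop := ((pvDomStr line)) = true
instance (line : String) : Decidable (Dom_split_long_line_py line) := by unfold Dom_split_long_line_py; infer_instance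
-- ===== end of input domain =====

-- B replaces A's manual index scan from position 80 with three str.find calls (one per
-- split character) combined by min — same O(n), measurably faster by a constant factor.

-- ===== PORT A =====
-- the 'while split_point < len(line) and line[split_point] not in " ,;"' loop
def aScan (cs : List Char) (sp : Nat) : Nat :=
  if h : sp < cs.length then
    if cs[sp] ∈ [' ', ',', ';'] then sp else aScan cs (sp + 1)
  else sp
termination_by cs.length - sp

def split_long_line_py (line : String) : List String :=
  if PySem.Str.len line ≤ 100 then [line]
  else
    let sp := aScan line.toList 80
    if sp = line.toList.length then [line]
    else [PySem.Str.rstrip (PySem.Str.slice line none (some (sp : Int))),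
          PySem.Str.lstrip (PySem.Str.slice line (some (sp : Int)) none)]

-- ===== PORT B =====
def split_long_line_py_alt (line : String) : List String :=
  if PySem.Str.len line ≤ 100 then [line]
  else
    let found := ([' ', ',', ';'].map
        (fun c => PySem.Str.findFrom line (String.ofList [c]) 80)).filter (fun p => p ≠ -1)
    match PySem.List.min? found (fun x => x) with
    | none => [line]
    | some p =>
        [PySem.Str.rstrip (PySem.Str.slice line none (some p)),
         PySem.Str.lstrip (PySem.Str.slice line (some p) none)]

-- ===== PRECONDITION & SPEC =====
def Spec_split_long_line_py (line : String) (out : List String) : Prop := out = split_long_line_py_alt line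
instance (line : String) (out : List String) : Decidable (Spec_split_long_line_py line out) := by unfold Spec_split_long_line_py; infer_instance

-- ===== CLAIM (what is proved, stated in full; the proofs are below) =====
def Claim_equal_split_long_line_py : Prop := ∀ (line : String), Dom_split_long_line_py line → Spec_split_long_line_py line (split_long_line_py line)

-- ===== LEMMAS AND PROOFS =====

-- the predicate of A's loop test, as a Bool
def splitCharP (c : Char) : Bool := decide (c ∈ ([' ', ',', ';'] : List Char))

lemma aScan_eq_findIdx (cs : List Char) (k : Nat) :
    aScan cs k = k + List.findIdx splitCharP (cs.drop k) := by
  by_cases h : k < cs.length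
  · rw [List.drop_eq_getElem_cons h, List.findIdx_cons]
    rw [aScan]
    simp only [h, dif_pos]
    by_cases hp : cs[k] ∈ ([' ', ',', ';'] : List Char)
    · simp [hp, splitCharP]
    · simp only [hp, splitCharP]
      rw [aScan_eq_findIdx cs (k + 1)]
      simp
      omega
  · rw [aScan]
    simp only [h]
    rw [List.drop_eq_nil_of_le (by omega)]
    simp
termination_by cs.length - k

lemma singleton_prefix_iff (c : Char) (u : List Char) : [c] <+: u ↔ u.head? = some c := by
  cases u <;> simp [List.cons_prefix_cons, eq_comm]

lemma singleton_infix_iff (c : Char) (t : List Char) : [c] <:+: t ↔ c ∈ t := by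
  constructor
  · intro h; exact List.singleton_sublist.mp h.sublist
  · intro h
    obtain ⟨s, u, rfl⟩ := List.mem_iff_append.mp h
    exact ⟨s, u, by simp⟩

-- a non-(-1) find of a split character lands at an index ≥ findIdx
lemma find_char_ge (t : List Char) (c : Char) (hc : splitCharP c = true)
    (h : PySem.Chars.find t [c] ≠ -1) :
    (List.findIdx splitCharP t : Int) ≤ PySem.Chars.find t [c] := by
  have h0 : 0 ≤ PySem.Chars.find t [c] := by
    have := PySem.Chars.neg_one_le_find t [c]; omega
  obtain ⟨hpre, -⟩ := PySem.Chars.find_spec h0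
  rw [singleton_prefix_iff] at hpre
  rw [List.head?_eq_getElem?, List.getElem?_drop, Nat.add_zero] at hpre
  have hlt : (PySem.Chars.find t [c]).toNat < t.length := (List.getElem?_eq_some_iff.mp hpre).1
  have hget : t[(PySem.Chars.find t [c]).toNat]'hlt = c := by
    simpa [List.getElem?_eq_getElem hlt] using hpre
  by_contra hcon
  have : (PySem.Chars.find t [c]).toNat < List.findIdx splitCharP t := by omega
  have hfalse := List.not_of_lt_findIdx this
  exact absurd (hget ▸ hfalse) (by simp [hc])

-- the find of the character sitting at index findIdx equals findIdx
lemma find_char_at_findIdx (t : List Char) (hj : List.findIdx splitCharP t < t.length) :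
    PySem.Chars.find t [t[List.findIdx splitCharP t]] = (List.findIdx splitCharP t : Int) := by
  set j := List.findIdx splitCharP t with hjdef
  set c := t[j]'hj with hcdef
  have hmem : c ∈ t := List.getElem_mem hj
  have hne : PySem.Chars.find t [c] ≠ -1 := by
    rw [ne_eq, PySem.Chars.find_eq_neg_one_iff, singleton_infix_iff]; simp [hmem]
  have hc : splitCharP c = true := List.findIdx_getElem (w := hj)
  have hge : (j : Int) ≤ PySem.Chars.find t [c] := find_char_ge t c hc hne
  have h0 : 0 ≤ PySem.Chars.find t [c] := by
    have := PySem.Chars.neg_one_le_find t [c]; omega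
  obtain ⟨-, hmin⟩ := PySem.Chars.find_spec h0
  -- [c] is a prefix of t.drop j, so find cannot exceed j
  have hpre : [c] <+: t.drop j := by
    rw [singleton_prefix_iff, List.head?_eq_getElem?, List.getElem?_drop, Nat.add_zero]
    exact List.getElem?_eq_getElem hj
  by_contra hcon
  have : j < (PySem.Chars.find t [c]).toNat := by omega
  exact hmin j this hpre

-- unfolded form of B's per-character find, for 100 < |line|
lemma findFrom_80 (line : String) (c : Char) (hlen : 100 < line.toList.length) :
    PySem.Str.findFrom line (String.ofList [c]) 80 =
      (if PySem.Chars.find (line.toList.drop 80) [c] = -1 then -1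
       else 80 + PySem.Chars.find (line.toList.drop 80) [c]) := by
  rw [PySem.Str.findFrom_eq]
  have h80 : ((80 : Nat) : Int) = (80 : Int) := by norm_num
  rw [← h80, PySem.Chars.findFrom_natCast line.toList (String.ofList [c]).toList 80 (by omega)]
  simp

lemma main_eq (line : String) : split_long_line_py line = split_long_line_py_alt line := by
  unfold split_long_line_py split_long_line_py_alt
  by_cases hlen : PySem.Str.len line ≤ 100
  · rw [if_pos hlen, if_pos hlen]
  · rw [if_neg hlen, if_neg hlen]
    dsimp only
    have hn : 100 < line.toList.length := by
      have := PySem.Str.len_eq line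
      simp [PySem.Str.len] at hlen ⊢
      omega
    set cs := line.toList with hcs
    set t := cs.drop 80 with ht
    set j := List.findIdx splitCharP t with hj
    have htlen : t.length = cs.length - 80 := by simp [ht]
    have hsp : aScan cs 80 = 80 + j := aScan_eq_findIdx cs 80
    have hfF : ∀ c : Char, PySem.Str.findFrom line (String.ofList [c]) 80 =
        (if PySem.Chars.find t [c] = -1 then -1 else 80 + PySem.Chars.find t [c]) :=
      fun c => findFrom_80 line c hn
    by_cases hall : j < t.length
    · -- a split character exists: both sides split at 80 + j
      set c0 := t[j]'hall with hc0
      have hf0 : PySem.Chars.find t [c0] = (j : Int) := find_char_at_findIdx t hall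
      have hc0P : splitCharP c0 = true := List.findIdx_getElem (w := hall)
      have hc0mem : c0 ∈ ([' ', ',', ';'] : List Char) := by
        simpa [splitCharP] using hc0P
      -- the c0 entry survives the filter with value 80 + j
      have hentry : (80 + (j : Int)) ∈
          (([' ', ',', ';'].map (fun c => PySem.Str.findFrom line (String.ofList [c]) 80)).filter
            (fun p => p ≠ -1)) := by
        have hne80 : ¬((80 : Int) + (j : Int) = -1) := by omega
        rw [List.mem_filter]
        refine ⟨List.mem_map.mpr ⟨c0, hc0mem, ?_⟩, by simpa using hne80⟩
        rw [hfF c0, hf0, if_neg (by omega : ¬((j : Nat) : Int) = -1)]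
      -- every surviving entry is ≥ 80 + j
      have hlb : ∀ p ∈ (([' ', ',', ';'].map (fun c => PySem.Str.findFrom line (String.ofList [c]) 80)).filter
            (fun p => p ≠ -1)), (80 + (j : Int)) ≤ p := by
        intro p hp
        rw [List.mem_filter] at hp
        obtain ⟨hmem, hne⟩ := hp
        obtain ⟨c, hcmem, rfl⟩ := List.mem_map.mp hmem
        rw [hfF c] at hne ⊢
        by_cases hfc : PySem.Chars.find t [c] = -1
        · simp [hfc] at hne
        · have hcP : splitCharP c = true := by simp [splitCharP, hcmem]
          have := find_char_ge t c hcP hfc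
          rw [if_neg hfc]
          omega
      -- min? is some (80 + j)
      obtain ⟨m, hm⟩ := Option.ne_none_iff_exists'.mp
        (fun hnone => List.ne_nil_of_mem hentry ((PySem.List.min?_eq_none_iff (κ := Int) _ (fun x : Int => x)).mp hnone))
      rw [hm]
      have hmmem := PySem.List.min?_mem hm
      have hmin := PySem.List.min?_isMin hm
      have hmeq : m = 80 + (j : Int) :=
        le_antisymm (hmin _ hentry) (hlb m hmmem)
      have hspn : ¬ aScan cs 80 = cs.length := by rw [hsp]; omega
      rw [if_neg hspn, hsp, hmeq]
      norm_num
    · -- no split character from index 80 on: both sides return [line]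
      have hjlen : j = t.length := le_antisymm List.findIdx_le_length (by omega)
      have hnone : ∀ x ∈ t, splitCharP x = false := List.findIdx_eq_length.mp hjlen.symm.symm
      have hfneg : ∀ c ∈ ([' ', ',', ';'] : List Char), PySem.Chars.find t [c] = -1 := by
        intro c hcmem
        rw [PySem.Chars.find_eq_neg_one_iff, singleton_infix_iff]
        intro hct
        have := hnone c hct
        simp [splitCharP, hcmem] at this
      have hfilter : (([' ', ',', ';'].map (fun c => PySem.Str.findFrom line (String.ofList [c]) 80)).filter
            (fun p => p ≠ -1)) = [] := by
        rw [List.filter_eq_nil_iff]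
        intro p hp
        obtain ⟨c, hcmem, rfl⟩ := List.mem_map.mp hp
        rw [hfF c, if_pos (hfneg c hcmem)]
        simp
      rw [hfilter]
      have hspn : aScan cs 80 = cs.length := by rw [hsp]; omega
      rw [if_pos hspn]
      simp [PySem.List.min?]

-- ===== VERDICT (by name: the statement is the Claim_ definition above) =====
theorem split_long_line_py_spec : Claim_equal_split_long_line_py := by
  intro line _
  unfold Spec_split_long_line_py
  exact main_eq line
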